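-- pv_equiv track=rewrite | github.com/JesusLopez5599/Master | IPPPD/entregable-01-ipppd-25-26.py | cuadrada
-- ===== SOURCE A (Python) =====
-- def cuadrada(a): #para comprobar que es una matriz cuadrada
--     if not a: #Suponemos que la matriz es no vacía
--         return False
--     filas= len(a)
--     for fila in a:
--         if len(fila) != filas:
--             return False
--     return True
-- ===== SOURCE B (Python) =====
-- def cuadrada(a):
--     # Arithmetic aggregate check: with n rows, the matrix is square iff no row
--     # is longer than n and the total number of entries is exactly n*n
--     # (if all lengths are <= n and they sum to n*n over n rows, each must be n).
--     n = len(a)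
--     return n > 0 and max(map(len, a)) <= n and sum(map(len, a)) == n * n
-- ===== Notes on version B (the rewrite author's own statement) =====
-- stated objective: alternative
-- what changed: Replaces A's per-row equality loop with early exit by an arithmetic aggregate test: B never compares any individual row length to n; it checks max(row lengths) <= n and sum(row lengths) == n*n, which together force every length to equal n.
import Mathlib
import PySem

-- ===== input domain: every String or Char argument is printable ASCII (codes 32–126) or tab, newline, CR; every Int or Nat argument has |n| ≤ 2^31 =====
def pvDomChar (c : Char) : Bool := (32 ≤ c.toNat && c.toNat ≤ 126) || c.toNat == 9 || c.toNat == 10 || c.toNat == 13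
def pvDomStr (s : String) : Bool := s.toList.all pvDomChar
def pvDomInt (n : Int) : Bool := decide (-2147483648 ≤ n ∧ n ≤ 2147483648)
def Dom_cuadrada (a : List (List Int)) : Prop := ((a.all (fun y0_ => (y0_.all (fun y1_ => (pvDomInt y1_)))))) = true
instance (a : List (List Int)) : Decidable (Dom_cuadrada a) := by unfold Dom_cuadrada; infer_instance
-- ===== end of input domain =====

-- B replaces A's per-row equality loop by an arithmetic aggregate test (max ≤ n and total entry count = n²); objective: alternative.

-- ===== PORT A =====
-- the 'for fila in a' loop with its early 'return False'
def cuadradaLoop (filas : Nat) : List (List Int) → Bool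
  | [] => true
  | fila :: rest => if fila.length ≠ filas then false else cuadradaLoop filas rest

def cuadrada (a : List (List Int)) : Bool :=
  if a = [] then false
  else cuadradaLoop a.length a

-- ===== PORT B =====
-- n > 0 and max(map(len, a)) <= n and sum(map(len, a)) == n * n
-- (Python's `and` short-circuits, so max is only taken on nonempty input; the
--  `none` branch of max? is therefore unreachable and totalised to false.)
def cuadrada_alt (a : List (List Int)) : Bool :=
  let n : Int := a.length
  let lens : List Int := a.map (fun r => (r.length : Int))
  decide (0 < n) &&
    (match PySem.List.max? lens (fun x => x) with
     | none => false
     | some m => decide (m ≤ n)) &&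
    decide (lens.sum = n * n)

-- ===== PRECONDITION & SPEC =====
def Spec_cuadrada (a : List (List Int)) (out : Bool) : Prop := out = cuadrada_alt a
instance (a : List (List Int)) (out : Bool) : Decidable (Spec_cuadrada a out) := by unfold Spec_cuadrada; infer_instance

-- ===== CLAIM (what is proved, stated in full; the proofs are below) =====
def Claim_equal_cuadrada : Prop := ∀ (a : List (List Int)), Dom_cuadrada a → Spec_cuadrada a (cuadrada a)

-- ===== LEMMAS AND PROOFS =====
-- A's loop is the all-rows check
lemma cuadradaLoop_eq_all (n : Nat) (l : List (List Int)) :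
    cuadradaLoop n l = l.all (fun r => r.length == n) := by
  induction l with
  | nil => rfl
  | cons h t ih => by_cases hl : h.length = n <;> simp [cuadradaLoop, hl, ih]

lemma sum_le_of_forall_le (c : Int) (l : List Int) (h : ∀ x ∈ l, x ≤ c) :
    l.sum ≤ c * l.length := by
  induction l with
  | nil => simp
  | cons x t ih =>
    have hx := h x (List.mem_cons_self)
    have ht := ih (fun y hy => h y (List.mem_cons_of_mem _ hy))
    simp only [List.sum_cons, List.length_cons]
    push_cast
    nlinarith

lemma all_eq_of_sum_eq (c : Int) (l : List Int) (h : ∀ x ∈ l, x ≤ c)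
    (hs : l.sum = c * l.length) : ∀ x ∈ l, x = c := by
  induction l with
  | nil => simp
  | cons x t ih =>
    have hx := h x (List.mem_cons_self)
    have ht : ∀ y ∈ t, y ≤ c := fun y hy => h y (List.mem_cons_of_mem _ hy)
    have hsumt := sum_le_of_forall_le c t ht
    have hxc : x = c := by
      simp only [List.sum_cons, List.length_cons] at hs
      push_cast at hs
      nlinarith
    intro y hy
    rcases List.mem_cons.mp hy with rfl | hy'
    · exact hxc
    · apply ih ht _ y hy'
      simp only [List.sum_cons, List.length_cons] at hs
      push_cast at hs ⊢
      linarith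

theorem pv_main (a : List (List Int)) : cuadrada a = cuadrada_alt a := by
  cases a with
  | nil => rfl
  | cons h t =>
    have hne : (h :: t : List (List Int)) ≠ [] := by simp
    set l : List (List Int) := h :: t with hl
    set n : Int := (l.length : Int) with hn
    set lens : List Int := l.map (fun r => (r.length : Int)) with hlens
    have hlensne : lens ≠ [] := by simp [hlens, hl]
    obtain ⟨m, hm⟩ : ∃ m, PySem.List.max? lens (fun x => x) = some m := by
      cases hmx : PySem.List.max? lens (fun x => x) with
      | none => exact absurd ((PySem.List.max?_eq_none_iff lens (fun x => x)).mp hmx) hlensne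
      | some m => exact ⟨m, rfl⟩
    have hmem : m ∈ lens := PySem.List.max?_mem hm
    have hmax : ∀ y ∈ lens, y ≤ m := fun y hy => PySem.List.max?_isMax hm y hy
    have hlenlen : (lens.length : Int) = n := by simp [hlens, hn]
    have hpos : 0 < n := by simp [hn, hl]
    simp only [cuadrada, if_neg hne, cuadradaLoop_eq_all, cuadrada_alt]
    rw [show ((h :: t : List (List Int)).length : Int) = n from rfl]
    rw [show ((h :: t : List (List Int)).map (fun r => (r.length : Int))) = lens from rfl]
    rw [hm]
    simp only [decide_eq_true hpos, Bool.true_and]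
    by_cases hall : ∀ r ∈ l, (r.length : Int) = n
    · have h1 : l.all (fun r => r.length == l.length) = true := by
        simp only [List.all_eq_true]
        intro r hr
        have := hall r hr
        simp; omega
      have hlenseq : ∀ x ∈ lens, x = n := by
        intro x hx
        obtain ⟨r, hr, rfl⟩ := List.mem_map.mp hx
        exact hall r hr
      have hmn : m = n := hlenseq m hmem
      have hsum : lens.sum = n * n := by
        have hmapc : l.map (fun r => (r.length : Int)) = l.map (fun _ => n) :=
          List.map_congr_left hall
        rw [hlens, hmapc, PySem.List.sum_map_const_int, ← hn]
      simp [h1, hmn, hsum]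
    · rw [not_forall] at hall
      simp only [not_forall, exists_prop] at hall
      obtain ⟨r, hr, hrn⟩ := hall
      have h1 : l.all (fun r => r.length == l.length) = false := by
        simp only [List.all_eq_false]
        refine ⟨r, hr, ?_⟩
        simp only [beq_iff_eq]
        intro hc; exact hrn (by rw [hc, hn])
      rw [h1]
      symm
      by_cases hmle : m ≤ n
      · -- all lens ≤ n but one differs, so sum < n*n
        have hle : ∀ x ∈ lens, x ≤ n := fun x hx => le_trans (hmax x hx) hmle
        have hsne : lens.sum ≠ n * n := by
          intro hs
          have := all_eq_of_sum_eq n lens hle (by rw [hs, hlenlen])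
          exact hrn (this _ (List.mem_map.mpr ⟨r, hr, rfl⟩))
        simp [hsne]
      · simp [hmle]

-- ===== VERDICT (by name: the statement is the Claim_ definition above) =====
theorem cuadrada_spec : Claim_equal_cuadrada := by
  intro a _
  exact pv_main a
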